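-- pv_equiv track=rewrite | github.com/Joshua-Smith222/Render | app/utils/token.py | _extract_bearer_token
-- ===== SOURCE A (Python) =====
-- from typing import Optional, Callable, Any
--
-- def _extract_bearer_token(auth_header: Optional[str]) -> Optional[str]:
--     if not auth_header:
--         return None
--     h = auth_header.strip()
--     lower = h.lower()
--     while lower.startswith("bearer"):
--         h = h[6:].strip()
--         lower = h.lower()
--     return h or None
-- ===== SOURCE B (Python) =====
-- from typing import Optional
--
-- def _extract_bearer_token(auth_header: Optional[str]) -> Optional[str]:
--     if not auth_header:
--         return None
--     h = auth_header.strip()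
--     low = h.lower()
--     n = len(low)
--     i = 0
--     while low.startswith("bearer", i):
--         i += 6
--         while i < n and low[i].isspace():
--             i += 1
--     return h[i:] or None
-- ===== Notes on version B (the rewrite author's own statement) =====
-- stated objective: alternative
-- what changed: A repeatedly rebuilds the string (h = h[6:].strip()) and re-lowercases it on every loop iteration; B lowercases once and advances an integer index over the fixed string (startswith(.., i) plus a whitespace-skipping inner loop), slicing only once at the end.
import Mathlib
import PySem

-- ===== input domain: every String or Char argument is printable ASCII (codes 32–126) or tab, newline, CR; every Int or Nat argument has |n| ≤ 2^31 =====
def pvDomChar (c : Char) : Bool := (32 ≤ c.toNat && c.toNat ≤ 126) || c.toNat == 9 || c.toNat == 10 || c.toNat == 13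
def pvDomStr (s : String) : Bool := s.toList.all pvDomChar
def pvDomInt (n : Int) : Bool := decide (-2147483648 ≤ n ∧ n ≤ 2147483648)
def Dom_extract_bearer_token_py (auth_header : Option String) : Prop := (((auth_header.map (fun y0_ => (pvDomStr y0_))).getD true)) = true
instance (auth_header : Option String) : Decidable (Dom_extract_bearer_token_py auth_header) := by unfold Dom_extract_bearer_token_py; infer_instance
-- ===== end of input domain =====

-- B replaces A's repeated slicing/re-stripping/re-lowering loop by a single lowering and an
-- index scan over the fixed string; same return value, no side effects in either version.

-- ===== PORT A =====
-- termination helper for aLoopA (cited by name in decreasing_by)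
theorem aLoopA_dec (h : List Char)
    (hs : PySem.Chars.startswith (PySem.Chars.lower h) "bearer".toList = true) :
    (PySem.Chars.strip (PySem.List.slice h (some 6) none)).length < h.length := by
  have h6 : 6 ≤ h.length := by
    have hp : "bearer".toList.isPrefixOf (PySem.Chars.lower h) = true := hs
    have := (List.isPrefixOf_iff_prefix.mp hp).length_le
    simpa [PySem.Chars.lower] using this
  have hsl : PySem.List.slice h (some 6) none = h.drop 6 := by
    rw [PySem.List.slice_from h (a := 6) (by omega)]; rfl
  have hle : (PySem.Chars.strip (h.drop 6)).length ≤ h.length - 6 := by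
    have h1 := List.length_dropWhile_le PySem.Chars.isspace (h.drop 6)
    have h2 := List.length_dropWhile_le PySem.Chars.isspace
      (List.dropWhile PySem.Chars.isspace (h.drop 6)).reverse
    simp only [PySem.Chars.strip, PySem.Chars.rstrip, PySem.Chars.lstrip,
      List.length_reverse, List.length_drop] at *
    omega
  rw [hsl]; omega

-- the 'while lower.startswith("bearer"): h = h[6:].strip(); lower = h.lower()' loop of A
def aLoopA (h : List Char) : List Char :=
  if _hs : PySem.Chars.startswith (PySem.Chars.lower h) "bearer".toList then
    aLoopA (PySem.Chars.strip (PySem.List.slice h (some 6) none))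
  else h
termination_by h.length
decreasing_by exact aLoopA_dec h _hs

def extract_bearer_token_py (auth_header : Option String) : Option String :=
  match auth_header with
  | none => none                                   -- 'if not auth_header'
  | some s =>
    if s.toList = [] then none                     -- '' is falsy too
    else
      let h := aLoopA (PySem.Chars.strip s.toList)
      if h = [] then none else some (String.ofList h)  -- 'return h or None'

-- ===== PORT B =====
-- 'while i < n and low[i].isspace(): i += 1' (n = len(low))
def skipWsB (low : List Char) (i : Nat) : Nat :=
  if hlt : i < low.length then
    if PySem.Chars.isspace low[i] then skipWsB low (i + 1) else i
  else i
termination_by low.length - i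

-- termination helpers for bLoopB (cited by name in decreasing_by)
theorem skipWsB_ge (low : List Char) (i : Nat) : i ≤ skipWsB low i := by
  fun_induction skipWsB low i with
  | case1 i hlt hsp ih => omega
  | case2 i hlt hsp => omega
  | case3 i hlt => omega

theorem bLoopB_dec (low : List Char) (i : Nat)
    (hs : PySem.Chars.startswith (low.drop i) "bearer".toList = true) :
    low.length - skipWsB low (i + 6) < low.length - i := by
  have hp : "bearer".toList.isPrefixOf (low.drop i) = true := hs
  have h6 : 6 ≤ (low.drop i).length := (List.isPrefixOf_iff_prefix.mp hp).length_le
  have := skipWsB_ge low (i + 6)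
  simp only [List.length_drop] at h6
  omega

-- 'while low.startswith("bearer", i): i += 6; <skip whitespace>'
-- (low.startswith(p, i) with 0 ≤ i is exactly: p is a prefix of low[i:])
def bLoopB (low : List Char) (i : Nat) : Nat :=
  if hs : PySem.Chars.startswith (low.drop i) "bearer".toList then
    bLoopB low (skipWsB low (i + 6))
  else i
termination_by low.length - i
decreasing_by exact bLoopB_dec low i hs

def extract_bearer_token_py_alt (auth_header : Option String) : Option String :=
  match auth_header with
  | none => none
  | some s =>
    if s.toList = [] then none
    else
      let h := PySem.Chars.strip s.toList
      let low := PySem.Chars.lower h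
      let i := bLoopB low 0
      let t := h.drop i                            -- h[i:] with 0 ≤ i
      if t = [] then none else some (String.ofList t)

-- ===== PRECONDITION & SPEC =====
def Spec_extract_bearer_token_py (auth_header : Option String) (out : Option String) : Prop := out = extract_bearer_token_py_alt auth_header
instance (auth_header : Option String) (out : Option String) : Decidable (Spec_extract_bearer_token_py auth_header out) := by unfold Spec_extract_bearer_token_py; infer_instance

-- ===== CLAIM (what is proved, stated in full; the proofs are below) =====
def Claim_equal_extract_bearer_token_py : Prop := ∀ (auth_header : Option String), Dom_extract_bearer_token_py auth_header → Spec_extract_bearer_token_py auth_header (extract_bearer_token_py auth_header)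

-- ===== LEMMAS AND PROOFS =====

theorem isspace_lowerChar (c : Char) :
    PySem.Chars.isspace (PySem.Chars.lowerChar c) = PySem.Chars.isspace c := by
  unfold PySem.Chars.lowerChar PySem.Chars.isspace PySem.Chars.isupper
  split
  · next h =>
    simp only [Bool.and_eq_true, decide_eq_true_eq, Char.le_def] at h
    have hb : 65 ≤ c.toNat ∧ c.toNat ≤ 90 := by
      unfold Char.toNat; constructor <;> [exact_mod_cast h.1; exact_mod_cast h.2]
    have h1 : (Char.ofNat (c.toNat + 32)).toNat = c.toNat + 32 := by
      rw [Char.toNat_ofNat]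
      have hv : (c.toNat + 32).isValidChar := by left; omega
      simp [hv]
    rw [Bool.eq_iff_iff]
    simp only [h1, Bool.or_eq_true, Bool.and_eq_true, decide_eq_true_eq]
    omega
  · rfl

theorem dropWhile_eq_drop {α : Type} (p : α → Bool) (l : List α) :
    List.dropWhile p l = l.drop (l.takeWhile p).length := by
  induction l with
  | nil => rfl
  | cons a t ih =>
    by_cases hp : p a <;> simp [hp, ih]

theorem dropWhile_idem {α : Type} (p : α → Bool) (l : List α) :
    List.dropWhile p (List.dropWhile p l) = List.dropWhile p l := by
  induction l with
  | nil => rfl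
  | cons a t ih =>
    by_cases hp : p a
    · simp [hp, ih]
    · simp [hp]

-- strip leaves no trailing whitespace
theorem rstrip_strip (s : List Char) :
    PySem.Chars.rstrip (PySem.Chars.strip s) = PySem.Chars.strip s := by
  simp [PySem.Chars.strip, PySem.Chars.rstrip, PySem.Chars.lstrip, dropWhile_idem]

-- a suffix of a right-stripped list is right-stripped
theorem rstrip_drop (h : List Char) (j : Nat)
    (hr : PySem.Chars.rstrip h = h) : PySem.Chars.rstrip (h.drop j) = h.drop j := by
  simp only [PySem.Chars.rstrip] at *
  have hr' : List.dropWhile PySem.Chars.isspace h.reverse = h.reverse := by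
    have := congrArg List.reverse hr
    simpa using this
  rw [List.reverse_drop]
  have htake : List.dropWhile PySem.Chars.isspace (h.reverse.take (h.length - j)) =
      h.reverse.take (h.length - j) := by
    rw [List.dropWhile_eq_self_iff] at hr' ⊢
    intro hl
    have hlen : 0 < h.reverse.length := by
      simp only [List.length_take, List.length_reverse] at hl ⊢; omega
    have hg : (h.reverse.take (h.length - j))[0] = h.reverse[0] := List.getElem_take
    rw [hg]; exact hr' hlen
  rw [htake, ← List.reverse_drop, List.reverse_reverse]

-- on a right-stripped list, strip is just the left strip
theorem strip_eq_dropWhile (x : List Char) (hr : PySem.Chars.rstrip x = x) :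
    PySem.Chars.strip x = List.dropWhile PySem.Chars.isspace x := by
  have hk : List.dropWhile PySem.Chars.isspace x =
      x.drop (x.takeWhile PySem.Chars.isspace).length := dropWhile_eq_drop _ x
  simp only [PySem.Chars.strip, PySem.Chars.lstrip, hk]
  exact rstrip_drop x _ hr

theorem lower_drop (h : List Char) (i : Nat) :
    (PySem.Chars.lower h).drop i = PySem.Chars.lower (h.drop i) := by
  simp [PySem.Chars.lower, List.map_drop]

theorem skipWsB_lower (h : List Char) (i : Nat) :
    skipWsB (PySem.Chars.lower h) i = skipWsB h i := by
  fun_induction skipWsB h i with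
  | case1 i hlt hsp ih =>
    rw [skipWsB]
    have hlt' : i < (PySem.Chars.lower h).length := by
      simpa [PySem.Chars.lower] using hlt
    have hg : (PySem.Chars.lower h)[i] = PySem.Chars.lowerChar h[i] := by
      simp [PySem.Chars.lower]
    rw [dif_pos hlt', hg, isspace_lowerChar, if_pos hsp, ih]
  | case2 i hlt hsp =>
    rw [skipWsB]
    have hlt' : i < (PySem.Chars.lower h).length := by
      simpa [PySem.Chars.lower] using hlt
    have hg : (PySem.Chars.lower h)[i] = PySem.Chars.lowerChar h[i] := by
      simp [PySem.Chars.lower]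
    rw [dif_pos hlt', hg, isspace_lowerChar, if_neg hsp]
  | case3 i hlt =>
    rw [skipWsB]
    have hge : ¬ i < (PySem.Chars.lower h).length := by
      simpa [PySem.Chars.lower] using hlt
    rw [dif_neg hge]

theorem drop_skipWsB (h : List Char) (j : Nat) :
    h.drop (skipWsB h j) = List.dropWhile PySem.Chars.isspace (h.drop j) := by
  fun_induction skipWsB h j with
  | case1 j hlt hsp ih =>
    have hcons : h.drop j = h[j] :: h.drop (j + 1) := List.drop_eq_getElem_cons hlt
    rw [hcons, List.dropWhile_cons, if_pos hsp, ih]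
  | case2 j hlt hsp =>
    have hcons : h.drop j = h[j] :: h.drop (j + 1) := List.drop_eq_getElem_cons hlt
    rw [hcons, List.dropWhile_cons, if_neg hsp, ← hcons]
  | case3 j hlt =>
    have : h.drop j = [] := List.drop_eq_nil_of_le (by omega)
    rw [this]; rfl

-- the heart of the proof: A's slice-and-restrip loop lands exactly where B's index scan points
theorem loop_agree (h : List Char) (k i : Nat) (hk : h.length ≤ i + k)
    (hr : PySem.Chars.rstrip h = h) :
    aLoopA (h.drop i) = h.drop (bLoopB (PySem.Chars.lower h) i) := by
  induction k generalizing i with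
  | zero =>
    have hnil : h.drop i = [] := List.drop_eq_nil_of_le (by omega)
    have hnil' : (PySem.Chars.lower h).drop i = [] := by
      rw [lower_drop, hnil]; rfl
    rw [hnil, aLoopA, bLoopB, hnil']
    rw [dif_neg (by decide), dif_neg (by decide), hnil]
  | succ k ih =>
    rw [aLoopA, bLoopB, lower_drop]
    by_cases hc : PySem.Chars.startswith (PySem.Chars.lower (h.drop i)) "bearer".toList
    · rw [dif_pos hc, dif_pos hc]
      have hp : "bearer".toList.isPrefixOf (PySem.Chars.lower (h.drop i)) = true := hc
      have h6 : 6 ≤ h.length - i := by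
        have := (List.isPrefixOf_iff_prefix.mp hp).length_le
        simpa [PySem.Chars.lower] using this
      have hsl : PySem.List.slice (h.drop i) (some 6) none = h.drop (i + 6) := by
        rw [PySem.List.slice_from _ (a := 6) (by omega)]
        simp [List.drop_drop]
      have hstrip : PySem.Chars.strip (h.drop (i + 6)) = h.drop (skipWsB h (i + 6)) := by
        rw [strip_eq_dropWhile _ (rstrip_drop h (i + 6) hr), drop_skipWsB]
      rw [hsl, hstrip, ← skipWsB_lower]
      apply ih
      have := skipWsB_ge (PySem.Chars.lower h) (i + 6)
      omega
    · rw [dif_neg hc, dif_neg hc]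

-- ===== VERDICT (by name: the statement is the Claim_ definition above) =====
theorem extract_bearer_token_py_spec : Claim_equal_extract_bearer_token_py := by
  intro auth_header _
  unfold Spec_extract_bearer_token_py
  match auth_header with
  | none => rfl
  | some s =>
    simp only [extract_bearer_token_py, extract_bearer_token_py_alt]
    by_cases hnil : s.toList = []
    · rw [if_pos hnil, if_pos hnil]
    · rw [if_neg hnil, if_neg hnil]
      have hmain := loop_agree (PySem.Chars.strip s.toList)
        (PySem.Chars.strip s.toList).length 0 (by omega) (rstrip_strip s.toList)
      simp only [List.drop_zero] at hmain
      rw [hmain]
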